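-- pv_equiv track=rewrite | github.com/pypi-data/pypi-mirror-141 | packages/louvaincpp/louvaincpp-0.0.3.tar.gz/louvaincpp-0.0.3/louvaincpp/algorithm.py | generate_partition
-- ===== SOURCE A (Python) =====
-- def generate_partition(dendrogram, level):
--     partition = range(len(dendrogram[-level]))
--     for i in range(level, len(dendrogram) + 1):
--         new_partition = dict()
--         for j in range(len(dendrogram[-i])):
--             new_partition[j] = partition[dendrogram[-i][j]]
--         partition = new_partition
--     return partition
-- ===== SOURCE B (Python) =====
-- def generate_partition(dendrogram, level):
--     # Per-node decomposition: walk each base node up the used chain of level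
--     # maps and read its community from the base partition, instead of A's
--     # level-by-level bulk remapping through intermediate dicts.
--     base = list(range(len(dendrogram[-level])))
--     n = len(dendrogram) - level
--     partition = {}
--     for j in range(len(dendrogram[0])):
--         c = j
--         for idx in range(n + 1):
--             c = dendrogram[idx][c]
--         partition[j] = base[c]
--     return partition
-- ===== Notes on version B (the rewrite author's own statement) =====
-- stated objective: alternative
-- what changed: B replaces A's level-by-level bulk remapping (rebuilding a whole partition dict per level) with an independent per-node walk: each base node follows its chain of community indices up through the used rows and reads its label from the base partition once.
-- outside the precondition, e.g. on generate_partition([[0, 0]], 0): A returns {0: 0, 1: 0}, B raises IndexError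
import Mathlib
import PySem

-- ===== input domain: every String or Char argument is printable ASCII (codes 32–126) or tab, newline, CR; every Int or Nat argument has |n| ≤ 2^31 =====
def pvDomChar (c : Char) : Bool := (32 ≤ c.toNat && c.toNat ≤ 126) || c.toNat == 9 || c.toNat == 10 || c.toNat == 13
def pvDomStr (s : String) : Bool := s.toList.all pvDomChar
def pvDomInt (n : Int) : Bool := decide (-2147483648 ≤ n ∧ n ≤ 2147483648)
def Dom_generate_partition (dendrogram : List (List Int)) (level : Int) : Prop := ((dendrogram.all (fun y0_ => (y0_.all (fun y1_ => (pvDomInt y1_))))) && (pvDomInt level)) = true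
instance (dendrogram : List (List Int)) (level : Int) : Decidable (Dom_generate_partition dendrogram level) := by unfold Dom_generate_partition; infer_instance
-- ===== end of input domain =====

-- B walks each base node independently up the chain of used level maps and reads its label
-- from the base partition, instead of A's level-by-level rebuild of a whole partition dict
-- ("alternative": a different traversal of the same data, similar cost).

-- shared helper: the dict-filling loop shape 'for j in range(m): d[j] = <F j>'
-- (A runs it once per level, B runs it once over the base nodes); none = a raise inside
def gpBuild (F : Int → Option Int) (m : Nat) : Option (PySem.Dict Int Int) :=
  (PySem.List.pyRange 0 (m : Int) 1).foldl
    (fun acc j => acc.bind fun nd => (F j).map fun c => nd.insert j c)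
    (some (PySem.Dict.mk []))

-- ===== PORT A =====
-- A's 'partition' is range(len(dendrogram[-level])) before the loop's first iteration
-- (Sum.inl of the length) and a dict afterwards (Sum.inr); 'partition[x]' looks up accordingly.
def gpLookup (part : Sum Nat (PySem.Dict Int Int)) (x : Int) : Option Int :=
  match part with
  | Sum.inl m => PySem.List.pyGet? (PySem.List.pyRange 0 (m : Int) 1) x  -- range(m)[x]
  | Sum.inr d => d.get? x                                                -- dict[x]; none = KeyError

-- inner loop of A: for j in range(len(row)): new_partition[j] = partition[row[j]]
def gpInner (row : List Int) (part : Sum Nat (PySem.Dict Int Int)) : Option (PySem.Dict Int Int) :=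
  gpBuild (fun j => (PySem.List.pyGet? row j).bind (gpLookup part)) row.length

-- one iteration of A's outer loop (state none = an exception was raised)
def gpOuter (dendrogram : List (List Int)) (st : Option (Sum Nat (PySem.Dict Int Int))) (i : Int) :
    Option (Sum Nat (PySem.Dict Int Int)) :=
  st.bind fun part =>
    (PySem.List.pyGet? dendrogram (-i)).bind fun row =>
      (gpInner row part).map Sum.inr

def generate_partition (dendrogram : List (List Int)) (level : Int) : List (Int × Int) :=
  match PySem.List.pyGet? dendrogram (-level) with
  | none => []  -- IndexError on dendrogram[-level]; excluded by Pre_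
  | some row0 =>
    match (PySem.List.pyRange level ((dendrogram.length : Int) + 1) 1).foldl
            (gpOuter dendrogram) (some (Sum.inl row0.length)) with
    | some (Sum.inr d) => d.items
    | some (Sum.inl _) => []  -- loop never ran: A returns a range, not a dict; excluded by Pre_
    | none => []              -- KeyError/IndexError inside the loop; excluded by Pre_

-- ===== PORT B =====
-- inner walk of B: c = j; for idx in range(steps): c = dendrogram[idx][c]  (none = IndexError)
def gpWalk (dendrogram : List (List Int)) (steps : Int) (j : Int) : Option Int :=
  (PySem.List.pyRange 0 steps 1).foldl
    (fun oc idx => oc.bind fun c =>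
      (PySem.List.pyGet? dendrogram idx).bind fun row => PySem.List.pyGet? row c)
    (some j)

def generate_partition_alt (dendrogram : List (List Int)) (level : Int) : List (Int × Int) :=
  match PySem.List.pyGet? dendrogram (-level) with
  | none => []  -- IndexError on dendrogram[-level]; excluded by Pre_
  | some toprow =>
    let base := PySem.List.pyRange 0 (toprow.length : Int) 1  -- list(range(len(dendrogram[-level])))
    let n : Int := (dendrogram.length : Int) - level
    match gpBuild
            (fun j => (gpWalk dendrogram (n + 1) j).bind fun c => PySem.List.pyGet? base c)
            (dendrogram.getD 0 []).length with
    | some d => d.items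
    | none => []  -- IndexError inside the walk or on base[c]; excluded by Pre_

-- ===== PRECONDITION & SPEC =====
-- Pre_ excludes the inputs where A raises (level outside 1..len(dendrogram), a community
-- index out of range for the level above) and the levels ≤ 0 on which A still returns a
-- value: there A's result rests on Python's negative-index wraparound of dendrogram[-i]
-- (for level 0 it applies dendrogram[0] twice), an accident no caller would rely on, and
-- B's walk raises IndexError there.
def Pre_generate_partition (dendrogram : List (List Int)) (level : Int) : Prop :=
  1 ≤ level ∧ level ≤ (dendrogram.length : Int) ∧
  (∀ t : Nat, t < dendrogram.length - level.toNat →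
    ∀ x ∈ dendrogram.getD t [], 0 ≤ x ∧
      x < ((dendrogram.getD (t + 1) []).length : Int)) ∧
  (∀ x ∈ dendrogram.getD (dendrogram.length - level.toNat) [],
    -((dendrogram.getD (dendrogram.length - level.toNat) []).length : Int) ≤ x ∧
    x < ((dendrogram.getD (dendrogram.length - level.toNat) []).length : Int))
instance (dendrogram : List (List Int)) (level : Int) : Decidable (Pre_generate_partition dendrogram level) := by
  unfold Pre_generate_partition; infer_instance

def pvWitness_generate_partition : List (List Int) × Int := ([[0, 1], [1, 0]], 1)

def Spec_generate_partition (dendrogram : List (List Int)) (level : Int) (out : List (Int × Int)) : Prop := out = generate_partition_alt dendrogram level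
instance (dendrogram : List (List Int)) (level : Int) (out : List (Int × Int)) : Decidable (Spec_generate_partition dendrogram level out) := by unfold Spec_generate_partition; infer_instance

-- ===== CLAIM (what is proved, stated in full; the proofs are below) =====
def Claim_equal_generate_partition : Prop := ∀ (dendrogram : List (List Int)) (level : Int), Dom_generate_partition dendrogram level → Pre_generate_partition dendrogram level → Spec_generate_partition dendrogram level (generate_partition dendrogram level)

-- ===== LEMMAS AND PROOFS =====

-- the composed community list after folding levels s, s-1, …, t onto the identity list;
-- gpLAux counts the levels already folded (k = s + 1 - t)
def gpLAux (den : List (List Int)) (s : Nat) : Nat → List Int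
  | 0 => PySem.List.pyRange 0 (((den.getD s []).length : Nat) : Int) 1
  | k + 1 => (den.getD (s - k) []).map (fun c => PySem.List.pyGetD (gpLAux den s k) c 0)

def gpL (den : List (List Int)) (s t : Nat) : List Int := gpLAux den s (s + 1 - t)

lemma gpL_top (den : List (List Int)) (s : Nat) :
    gpL den s (s + 1) = PySem.List.pyRange 0 (((den.getD s []).length : Nat) : Int) 1 := by
  unfold gpL
  rw [Nat.sub_self]
  rfl

lemma gpL_eq (den : List (List Int)) (s t : Nat) (ht : t ≤ s) :
    gpL den s t = (den.getD t []).map (fun c => PySem.List.pyGetD (gpL den s (t + 1)) c 0) := by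
  unfold gpL
  rw [show s + 1 - t = (s - t) + 1 by omega, show s + 1 - (t + 1) = s - t by omega]
  show gpLAux den s ((s - t) + 1) = _
  rw [gpLAux, show s - (s - t) = t by omega]

lemma len_gpL (den : List (List Int)) (s t : Nat) (ht : t ≤ s) :
    (gpL den s t).length = (den.getD t []).length := by
  rw [gpL_eq den s t ht, List.length_map]

lemma len_gpL_top (den : List (List Int)) (s : Nat) :
    (gpL den s (s + 1)).length = (den.getD s []).length := by
  rw [gpL_top, PySem.List.length_pyRange_one]
  omega

-- xs[i] returns precisely its total-form value while i is in range
lemma pyGet?_eq_some_pyGetD (xs : List Int) (i : Int) (h : PySem.Raise.InRange xs.length i) :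
    PySem.List.pyGet? xs i = some (PySem.List.pyGetD xs i 0) := by
  have hs : (PySem.List.pyGet? xs i).isSome := by
    rw [Option.isSome_iff_ne_none]
    intro h0
    rw [PySem.List.pyGet?_eq_none_iff] at h0
    exact h0 h
  obtain ⟨v, hv⟩ := Option.isSome_iff_exists.1 hs
  rw [hv]
  simp [PySem.List.pyGetD, hv]

-- lookup in the dict {j: f j for j in range(a, m)}
lemma get?_mk_map_range (f : Int → Int) (a m x : Int) (ha : a ≤ x) (hx : x < m) :
    (PySem.Dict.mk ((PySem.List.pyRange a m 1).map (fun j => (j, f j)))).get? x = some (f x) := by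
  have hrec : ∀ (k : Nat) (a : Int), a ≤ x → x < m → (m - a).toNat = k →
      (PySem.Dict.mk ((PySem.List.pyRange a m 1).map (fun j => (j, f j)))).get? x = some (f x) := by
    intro k
    induction k with
    | zero => intro a h1 h2 h3; omega
    | succ k ih =>
      intro a h1 h2 h3
      rw [PySem.List.pyRange_one_cons (by omega)]
      simp only [List.map_cons]
      rw [PySem.Dict.get?_mk_cons]
      by_cases hax : a = x
      · simp [hax]
      · rw [if_neg (by simpa using hax)]
        exact ih (a + 1) (by omega) h2 (by omega)
  exact hrec (m - a).toNat a ha hx rfl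

-- …and a miss outside the key range
lemma get?_mk_map_range_none (f : Int → Int) (a m x : Int) (hx : x < a ∨ m ≤ x) :
    (PySem.Dict.mk ((PySem.List.pyRange a m 1).map (fun j => (j, f j)))).get? x = none := by
  have hrec : ∀ (k : Nat) (a : Int), (x < a ∨ m ≤ x) → (m - a).toNat = k →
      (PySem.Dict.mk ((PySem.List.pyRange a m 1).map (fun j => (j, f j)))).get? x = none := by
    intro k
    induction k with
    | zero =>
      intro a _ h3
      rw [PySem.List.pyRange_one_eq_nil (by omega)]
      rfl
    | succ k ih =>
      intro a h1 h3
      rw [PySem.List.pyRange_one_cons (by omega)]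
      simp only [List.map_cons]
      rw [PySem.Dict.get?_mk_cons]
      rw [if_neg (by simp; omega)]
      exact ih (a + 1) (by omega) (by omega)
  exact hrec (m - a).toNat a hx rfl

-- inserting a key ≥ the range bound appends
lemma insert_mk_map_range_append (f : Int → Int) (a m k : Int) (v : Int) (hk : m ≤ k) :
    (PySem.Dict.mk ((PySem.List.pyRange a m 1).map (fun j => (j, f j)))).insert k v
      = PySem.Dict.mk (((PySem.List.pyRange a m 1).map (fun j => (j, f j))) ++ [(k, v)]) := by
  have hc : (PySem.Dict.mk ((PySem.List.pyRange a m 1).map (fun j => (j, f j)))).contains k = false := by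
    simp only [PySem.Dict.contains_mk]
    rw [List.any_eq_false]
    intro p hp
    simp only [List.mem_map] at hp
    obtain ⟨j, hj, rfl⟩ := hp
    have hjr := (PySem.List.mem_pyRange_one).1 hj
    simp only [beq_iff_eq]
    omega
  unfold PySem.Dict.insert
  rw [hc]
  simp

-- the dict-building loop, fully evaluated
lemma gpBuild_eq (F : Int → Option Int) (f : Int → Int) (m : Nat)
    (h : ∀ j : Int, 0 ≤ j → j < (m : Int) → F j = some (f j)) :
    gpBuild F m = some (PySem.Dict.mk ((PySem.List.pyRange 0 (m : Int) 1).map (fun j => (j, f j)))) := by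
  induction m with
  | zero => simp [gpBuild, PySem.List.pyRange_one_eq_nil]
  | succ m ih =>
    unfold gpBuild at ih ⊢
    rw [show (((m : Nat) + 1 : Nat) : Int) = (m : Int) + 1 by push_cast; ring]
    rw [PySem.List.pyRange_one_succ_right (by positivity)]
    rw [List.foldl_append]
    rw [ih (fun j h1 h2 => h j h1 (by omega))]
    simp only [List.foldl_cons, List.foldl_nil, Option.bind_some]
    rw [h (m : Int) (by positivity) (by omega)]
    simp only [Option.map_some]
    rw [insert_mk_map_range_append f 0 (m : Int) (m : Int) (f m) le_rfl]
    simp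

-- invariant carried by A's partition value while layer t is about to be processed
def gpInv (den : List (List Int)) (s t : Nat) (part : Sum Nat (PySem.Dict Int Int)) : Prop :=
  ∀ x : Int, (t = s ∨ 0 ≤ x) → gpLookup part x = PySem.List.pyGet? (gpL den s (t + 1)) x

-- one iteration of A's outer loop turns the invariant's lookup table into the composed list
lemma gpInner_eq (den : List (List Int)) (s t : Nat) (part : Sum Nat (PySem.Dict Int Int))
    (ht : t ≤ s) (htlen : t < den.length)
    (hb : ∀ x ∈ den.getD t [], PySem.Raise.InRange (gpL den s (t + 1)).length x ∧ (t = s ∨ 0 ≤ x))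
    (hinv : gpInv den s t part) :
    gpInner den[t] part
      = some (PySem.Dict.mk ((PySem.List.pyRange 0 ((den[t].length : Nat) : Int) 1).map
          (fun j => (j, PySem.List.pyGetD (gpL den s t) j 0)))) := by
  unfold gpInner
  refine gpBuild_eq _ _ den[t].length ?_
  intro j hj0 hjm
  rw [PySem.List.pyGet?_of_nonneg _ hj0]
  have hjlen : j.toNat < den[t].length := by omega
  rw [List.getElem?_eq_getElem hjlen]
  simp only [Option.bind_some]
  have hmemb : den[t][j.toNat] ∈ den.getD t [] := by
    rw [List.getD_eq_getElem den [] htlen]; exact List.getElem_mem hjlen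
  obtain ⟨hin, hside⟩ := hb den[t][j.toNat] hmemb
  rw [hinv den[t][j.toNat] hside, pyGet?_eq_some_pyGetD _ _ hin]
  rw [gpL_eq den s t ht, List.getD_eq_getElem den [] htlen]
  rw [PySem.List.pyGetD_eq_getElem _ _ hj0 (by rw [List.length_map]; omega)]
  rw [List.getElem_map]

-- A's outer loop from layer t down to layer 0 produces the composed list as a dict
lemma gpLoopA (den : List (List Int)) (level : Int)
    (hl1 : 1 ≤ level) (hl2 : level ≤ (den.length : Int))
    (hb : ∀ t : Nat, t ≤ den.length - level.toNat →
      ∀ x ∈ den.getD t [], PySem.Raise.InRange (gpL den (den.length - level.toNat) (t + 1)).length x ∧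
        (t = den.length - level.toNat ∨ 0 ≤ x)) :
    ∀ (t : Nat) (part : Sum Nat (PySem.Dict Int Int)),
      t ≤ den.length - level.toNat → gpInv den (den.length - level.toNat) t part →
      (PySem.List.pyRange ((den.length : Int) - (t : Int)) ((den.length : Int) + 1) 1).foldl
          (gpOuter den) (some part)
        = some (Sum.inr (PySem.Dict.mk
            ((PySem.List.pyRange 0 (((den.getD 0 []).length : Nat) : Int) 1).map
              (fun j => (j, PySem.List.pyGetD (gpL den (den.length - level.toNat) 0) j 0))))) := by
  have hsn : den.length - level.toNat < den.length := by omega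
  intro t
  induction t with
  | zero =>
    intro part _ hinv
    have h0len : 0 < den.length := by omega
    rw [show (den.length : Int) - ((0 : Nat) : Int) = (den.length : Int) by push_cast; ring]
    rw [PySem.List.pyRange_one_singleton, List.foldl_cons, List.foldl_nil]
    unfold gpOuter
    simp only [Option.bind_some]
    rw [PySem.List.pyGet?_neg_natCast den den.length (by omega) (by omega)]
    rw [Nat.sub_self, List.getElem?_eq_getElem h0len]
    simp only [Option.bind_some]
    rw [gpInner_eq den _ 0 part (by omega) h0len (hb 0 (by omega)) hinv]
    simp only [Option.map_some]
    rw [List.getD_eq_getElem den [] h0len]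
  | succ t ih =>
    intro part hts hinv
    have htlen : t + 1 < den.length := by omega
    rw [PySem.List.pyRange_one_cons (by omega), List.foldl_cons]
    unfold gpOuter
    simp only [Option.bind_some]
    rw [show -((den.length : Int) - (((t : Nat) + 1 : Nat) : Int))
          = -(((den.length - (t + 1) : Nat)) : Int) by push_cast; omega]
    rw [PySem.List.pyGet?_neg_natCast den (den.length - (t + 1)) (by omega) (by omega)]
    rw [show den.length - (den.length - (t + 1)) = t + 1 by omega]
    rw [List.getElem?_eq_getElem htlen]
    simp only [Option.bind_some]
    rw [gpInner_eq den _ (t + 1) part (by omega) htlen (hb (t + 1) (by omega)) hinv]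
    simp only [Option.map_some]
    rw [show (den.length : Int) - (((t : Nat) + 1 : Nat) : Int) + 1
          = (den.length : Int) - ((t : Nat) : Int) by push_cast; ring]
    refine ih (Sum.inr _) (by omega) ?_
    intro x hx0
    rcases hx0 with hx0 | hx0
    · omega
    simp only [gpLookup]
    rcases Int.lt_or_le x ((den[t+1].length : Nat) : Int) with hxb | hxb
    · rw [get?_mk_map_range _ 0 _ x hx0 hxb]
      have hin : PySem.Raise.InRange (gpL den (den.length - level.toNat) (t + 1)).length x := by
        rw [len_gpL den _ (t + 1) (by omega), List.getD_eq_getElem den [] htlen]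
        exact ⟨by omega, by omega⟩
      rw [pyGet?_eq_some_pyGetD _ x hin]
    · rw [get?_mk_map_range_none _ 0 _ x (Or.inr hxb)]
      symm
      rw [PySem.List.pyGet?_eq_none_iff]
      intro hin
      rw [len_gpL den _ (t + 1) (by omega), List.getD_eq_getElem den [] htlen] at hin
      simp only [PySem.Raise.InRange] at hin
      omega

-- a pyGetD at an in-range index does not depend on the default
lemma pyGetD_default_irrel {α : Type} (xs : List α) (i : Int) (d d' : α)
    (h : PySem.Raise.InRange xs.length i) :
    PySem.List.pyGetD xs i d = PySem.List.pyGetD xs i d' := by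
  have hs : PySem.List.pyGet? xs i ≠ none := by
    intro h0
    exact ((PySem.List.pyGet?_eq_none_iff xs i).1 h0) h
  cases hv : PySem.List.pyGet? xs i with
  | none => exact absurd hv hs
  | some v => simp [PySem.List.pyGetD, hv]

-- map-then-index with the literal default 0, at an in-range index
lemma pyGetD_map_zero (g : Int → Int) (xs : List Int) (c : Int)
    (h : PySem.Raise.InRange xs.length c) :
    PySem.List.pyGetD (xs.map g) c 0 = g (PySem.List.pyGetD xs c 0) := by
  rw [pyGetD_default_irrel (xs.map g) c 0 (g 0)
        (by rw [List.length_map]; exact h)]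
  exact PySem.List.pyGetD_map g xs c 0

-- B's per-node walk, step by step: after k steps the running community c is the
-- in-range index whose label in the composed list gpL … k is node j's final label
lemma gpWalkAux (den : List (List Int)) (s : Nat) (hsn : s < den.length)
    (hb : ∀ t : Nat, t ≤ s →
      ∀ x ∈ den.getD t [], PySem.Raise.InRange (gpL den s (t + 1)).length x)
    (j : Int) (hj0 : 0 ≤ j) (hjm : j < ((gpL den s 0).length : Int)) :
    ∀ k : Nat, k ≤ s + 1 →
      ∃ c : Int,
        (PySem.List.pyRange 0 (k : Int) 1).foldl
          (fun oc idx => oc.bind fun c =>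
            (PySem.List.pyGet? den idx).bind fun row => PySem.List.pyGet? row c)
          (some j) = some c ∧
        PySem.Raise.InRange (gpL den s k).length c ∧
        PySem.List.pyGetD (gpL den s k) c 0 = PySem.List.pyGetD (gpL den s 0) j 0 := by
  intro k
  induction k with
  | zero =>
    intro _
    exact ⟨j, by simp [PySem.List.pyRange_one_eq_nil], ⟨by omega, hjm⟩, rfl⟩
  | succ k ih =>
    intro hks
    obtain ⟨c, hc, hin, heq⟩ := ih (by omega)
    have hklen : k < den.length := by omega
    have hks' : k ≤ s := by omega
    have hinr : PySem.Raise.InRange den[k].length c := by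
      have := len_gpL den s k hks'
      rw [this, List.getD_eq_getElem den [] hklen] at hin
      exact hin
    refine ⟨PySem.List.pyGetD den[k] c 0, ?_, ?_, ?_⟩
    · rw [show (((k : Nat) + 1 : Nat) : Int) = (k : Int) + 1 by push_cast; ring]
      rw [PySem.List.pyRange_one_succ_right (by positivity), List.foldl_append, hc]
      simp only [List.foldl_cons, List.foldl_nil, Option.bind_some]
      rw [PySem.List.pyGet?_of_nonneg _ (by positivity)]
      rw [Int.toNat_natCast, List.getElem?_eq_getElem hklen]
      simp only [Option.bind_some]
      rw [pyGet?_eq_some_pyGetD den[k] c hinr]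
    · have hmem : PySem.List.pyGetD den[k] c 0 ∈ den.getD k [] := by
        rw [List.getD_eq_getElem den [] hklen]
        exact PySem.List.pyGetD_mem den[k] 0 hinr
      exact hb k hks' _ hmem
    · rw [← heq, gpL_eq den s k hks', List.getD_eq_getElem den [] hklen]
      rw [pyGetD_map_zero _ _ _ hinr]

-- ===== VERDICT (by name: the statement is the Claim_ definition above) =====
theorem generate_partition_spec : Claim_equal_generate_partition := by
  intro den level _ hpre
  obtain ⟨hl1, hl2, hmid, htop⟩ := hpre
  have hsn : den.length - level.toNat < den.length := by omega
  have h0len : 0 < den.length := by omega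
  unfold Spec_generate_partition generate_partition generate_partition_alt
  have hgetA : PySem.List.pyGet? den (-level) = some den[den.length - level.toNat] := by
    rw [show -level = -((level.toNat : Nat) : Int) by omega]
    rw [PySem.List.pyGet?_neg_natCast den level.toNat (by omega) (by omega)]
    exact List.getElem?_eq_getElem hsn
  -- the per-layer bounds, phrased against the composed lists' lengths
  have hb : ∀ t : Nat, t ≤ den.length - level.toNat →
      ∀ x ∈ den.getD t [], PySem.Raise.InRange (gpL den (den.length - level.toNat) (t + 1)).length x ∧
        (t = den.length - level.toNat ∨ 0 ≤ x) := by
    intro t ht x hx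
    rcases Nat.lt_or_ge t (den.length - level.toNat) with hcase | hcase
    · obtain ⟨h1, h2⟩ := hmid t hcase x hx
      rw [len_gpL den _ (t + 1) (by omega)]
      exact ⟨⟨by omega, h2⟩, Or.inr h1⟩
    · have hteq : t = den.length - level.toNat := by omega
      subst hteq
      obtain ⟨h1, h2⟩ := htop x hx
      rw [len_gpL_top]
      exact ⟨⟨h1, h2⟩, Or.inl rfl⟩
  -- A's side: the outer loop, started on range(len(dendrogram[-level]))
  have hinv0 : gpInv den (den.length - level.toNat) (den.length - level.toNat)
      (Sum.inl den[den.length - level.toNat].length) := by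
    intro x _
    simp only [gpLookup]
    rw [gpL_top, List.getD_eq_getElem den [] hsn]
  have hloop := gpLoopA den level hl1 hl2 hb (den.length - level.toNat)
    (Sum.inl den[den.length - level.toNat].length) le_rfl hinv0
  rw [show (den.length : Int) - ((den.length - level.toNat : Nat) : Int) = level by omega] at hloop
  -- B's side: the per-node walk computes the same labels, node by node
  have hsteps : (den.length : Int) - level + 1 = (((den.length - level.toNat + 1 : Nat)) : Int) := by
    omega
  have hlen0 : (gpL den (den.length - level.toNat) 0).length = (den.getD 0 []).length :=
    len_gpL den _ 0 (by omega)
  have hBdict : gpBuild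
      (fun j => (gpWalk den ((den.length : Int) - level + 1) j).bind fun c =>
        PySem.List.pyGet? (PySem.List.pyRange 0 (den[den.length - level.toNat].length : Int) 1) c)
      (den.getD 0 []).length
      = some (PySem.Dict.mk
          ((PySem.List.pyRange 0 (((den.getD 0 []).length : Nat) : Int) 1).map
            (fun j => (j, PySem.List.pyGetD (gpL den (den.length - level.toNat) 0) j 0)))) := by
    refine gpBuild_eq _ _ _ ?_
    intro j hj0 hjm
    obtain ⟨c, hc, hin, heq⟩ := gpWalkAux den (den.length - level.toNat) hsn
      (fun t ht x hx => (hb t ht x hx).1) j hj0 (by omega)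
      (den.length - level.toNat + 1) le_rfl
    unfold gpWalk
    rw [hsteps, hc]
    simp only [Option.bind_some]
    have hbase : PySem.List.pyRange 0 (den[den.length - level.toNat].length : Int) 1
        = gpL den (den.length - level.toNat) (den.length - level.toNat + 1) := by
      rw [gpL_top, List.getD_eq_getElem den [] hsn]
    rw [hbase, pyGet?_eq_some_pyGetD _ c hin, heq]
  simp only [hgetA, hloop, hBdict]
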